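-- pv_equiv track=rewrite | github.com/Futuredigits/futuredigits-bot | tools/premium_passion.py | calculate_passion_number
-- ===== SOURCE A (Python) =====
-- def calculate_passion_number(full_name: str) -> int:
--     """Calculate Passion Number using only vowels in the name"""
--     vowels = "AEIOUY"
--     letter_values = {'A':1, 'E':5, 'I':9, 'O':6, 'U':3, 'Y':7}
--     name = full_name.upper()
--     total = sum(letter_values[ch] for ch in name if ch in vowels)
--
--     def reduce_num(n):
--         if n in {11, 22, 33}:  # Master numbers
--             return n
--         while n > 9:
--             n = sum(int(d) for d in str(n))
--         return n
--
--     return reduce_num(total)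
-- ===== SOURCE B (Python) =====
-- def calculate_passion_number(full_name: str) -> int:
--     """Calculate Passion Number using only vowels in the name"""
--     values = {'A': 1, 'E': 5, 'I': 9, 'O': 6, 'U': 3, 'Y': 7,
--               'a': 1, 'e': 5, 'i': 9, 'o': 6, 'u': 3, 'y': 7}
--     total = sum(values.get(ch, 0) for ch in full_name)
--     if total in (11, 22, 33):
--         return total
--     return 0 if total == 0 else 1 + (total - 1) % 9
-- ===== Notes on version B (the rewrite author's own statement) =====
-- stated objective: simpler
-- what changed: Replaced the iterative repeated digit-summing while-loop (str/int round trips) with the closed-form digital root 1 + (total - 1) % 9 (after the master-number and zero checks), and summed vowel values in one direct dict.get pass over the original string instead of upper-casing and filtering.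
import Mathlib
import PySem

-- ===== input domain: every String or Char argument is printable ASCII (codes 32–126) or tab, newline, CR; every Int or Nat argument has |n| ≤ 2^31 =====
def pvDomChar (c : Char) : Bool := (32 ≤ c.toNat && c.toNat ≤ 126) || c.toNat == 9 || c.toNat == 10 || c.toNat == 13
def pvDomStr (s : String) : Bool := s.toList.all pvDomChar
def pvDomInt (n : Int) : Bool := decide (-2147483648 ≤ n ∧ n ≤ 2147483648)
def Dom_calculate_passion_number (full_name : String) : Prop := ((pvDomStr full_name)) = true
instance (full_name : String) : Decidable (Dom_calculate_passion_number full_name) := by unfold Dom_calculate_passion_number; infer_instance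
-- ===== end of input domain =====

-- B replaces A's while-loop digit-summing with the closed-form digital root and sums
-- vowel values in one direct dict.get pass (no upper-casing); objective: simpler.

-- ===== PORT A =====
-- sum(int(d) for d in str(n)); int(d) is applied to decimal digit characters only
-- (the loop body runs with n > 9), where it never raises, so `.getD 0` is exact.
def pvDigitSumA (n : Int) : Int :=
  ((PySem.Int.toChars n).map (fun d => (PySem.Int.ofChars? [d]).getD 0)).sum

-- termination facts for the `while n > 9` loop (the port cites pvDigitSumA_lt by name)
theorem pvCharValDigit : ∀ k, k < 10 → ((PySem.Int.ofChars? [Nat.digitChar k]).getD 0) = (k : Int) := by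
  decide

theorem pvToDigitsCoreSum : ∀ (fuel n : Nat) (ds : List Char), n < fuel →
    ((Nat.toDigitsCore 10 fuel n ds).map (fun d => (PySem.Int.ofChars? [d]).getD 0)).sum
      = ((Nat.digits 10 n).sum : Int) + ((ds.map (fun d => (PySem.Int.ofChars? [d]).getD 0)).sum) := by
  intro fuel
  induction fuel with
  | zero => intro n ds h; omega
  | succ fuel ih =>
    intro n ds h
    rw [Nat.toDigitsCore]
    by_cases h0 : n / 10 = 0
    · have hn : n < 10 := by omega
      simp only [h0, if_true]
      rcases Nat.eq_zero_or_pos n with hz | hp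
      · subst hz; simp [pvCharValDigit 0 (by norm_num)]
      · rw [Nat.digits_def' (by norm_num : 1 < 10) hp, h0]
        simp [Nat.mod_eq_of_lt hn, pvCharValDigit n hn]
    · simp only [h0, if_false]
      have hp : 0 < n := by omega
      have hlt : n / 10 < fuel := by omega
      rw [ih (n / 10) _ hlt, Nat.digits_def' (by norm_num : 1 < 10) hp]
      simp [pvCharValDigit (n % 10) (Nat.mod_lt _ (by norm_num))]
      ring

theorem pvDigitSumA_cast (m : Nat) : pvDigitSumA (m : Int) = ((Nat.digits 10 m).sum : Int) := by
  unfold pvDigitSumA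
  have : PySem.Int.toChars (m : Int) = Nat.toDigits 10 m := by
    simp [PySem.Int.toChars]
  rw [this, Nat.toDigits]
  simpa using pvToDigitsCoreSum (m + 1) m [] (by omega)

theorem pvDigitsSum_le : ∀ m : Nat, (Nat.digits 10 m).sum ≤ m := by
  intro m
  induction m using Nat.strong_induction_on with
  | _ m ih =>
    rcases Nat.eq_zero_or_pos m with hz | hp
    · subst hz; simp
    · rw [Nat.digits_def' (by norm_num : 1 < 10) hp]
      have := ih (m / 10) (by omega)
      simp only [List.sum_cons]
      omega

theorem pvDigitSumA_lt (n : Int) (h : 9 < n) : (pvDigitSumA n).toNat < n.toNat := by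
  have hm : n = ((n.toNat : Nat) : Int) := by omega
  rw [hm, pvDigitSumA_cast]
  have h10 : 10 ≤ n.toNat := by omega
  rw [Nat.digits_def' (by norm_num : 1 < 10) (by omega : 0 < n.toNat)]
  have := pvDigitsSum_le (n.toNat / 10)
  simp only [Int.toNat_natCast, List.sum_cons]
  omega

-- the `while n > 9: n = sum(int(d) for d in str(n))` loop of reduce_num
def pvReduceLoop (n : Int) : Int :=
  if 9 < n then pvReduceLoop (pvDigitSumA n) else n
termination_by n.toNat
decreasing_by exact pvDigitSumA_lt n (by assumption)

-- reduce_num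
def pvReduceNum (n : Int) : Int :=
  if n = 11 ∨ n = 22 ∨ n = 33 then n else pvReduceLoop n

def calculate_passion_number (full_name : String) : Int :=
  let vowels := "AEIOUY"
  let letter_values : PySem.Dict Char Int :=
    PySem.Dict.ofList [('A', 1), ('E', 5), ('I', 9), ('O', 6), ('U', 3), ('Y', 7)]
  let name := PySem.Str.upper full_name
  -- letter_values[ch] can never raise KeyError here: every ch passing the vowel
  -- filter is a key of letter_values, so `.getD 0` is exact.
  let total := ((name.toList.filter (fun ch => PySem.Chars.isIn [ch] vowels.toList)).map
      (fun ch => (letter_values.get? ch).getD 0)).sum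
  pvReduceNum total

-- ===== PORT B =====
def calculate_passion_number_alt (full_name : String) : Int :=
  let values : PySem.Dict Char Int :=
    PySem.Dict.ofList [('A', 1), ('E', 5), ('I', 9), ('O', 6), ('U', 3), ('Y', 7),
                       ('a', 1), ('e', 5), ('i', 9), ('o', 6), ('u', 3), ('y', 7)]
  let total := (full_name.toList.map (fun ch => values.getD ch 0)).sum
  if total = 11 ∨ total = 22 ∨ total = 33 then total
  else if total = 0 then 0 else 1 + PySem.Int.mod (total - 1) 9

-- ===== PRECONDITION & SPEC =====
def Spec_calculate_passion_number (full_name : String) (out : Int) : Prop := out = calculate_passion_number_alt full_name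
instance (full_name : String) (out : Int) : Decidable (Spec_calculate_passion_number full_name out) := by unfold Spec_calculate_passion_number; infer_instance

-- ===== CLAIM (what is proved, stated in full; the proofs are below) =====
def Claim_equal_calculate_passion_number : Prop := ∀ (full_name : String), Dom_calculate_passion_number full_name → Spec_calculate_passion_number full_name (calculate_passion_number full_name)

-- ===== LEMMAS AND PROOFS =====

-- A's per-character contribution (on the already upper-cased character) agrees with
-- B's direct lookup, for every character in the input domain.
set_option maxRecDepth 10000 in
theorem pvCharContrib : ∀ k : Nat, k < 128 →
    (if PySem.Chars.isIn [PySem.Chars.upperChar (Char.ofNat k)] "AEIOUY".toList then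
      ((PySem.Dict.ofList [('A', (1:Int)), ('E', 5), ('I', 9), ('O', 6), ('U', 3), ('Y', 7)]).get?
        (PySem.Chars.upperChar (Char.ofNat k))).getD 0
     else 0)
    = (PySem.Dict.ofList [('A', (1:Int)), ('E', 5), ('I', 9), ('O', 6), ('U', 3), ('Y', 7),
                          ('a', 1), ('e', 5), ('i', 9), ('o', 6), ('u', 3), ('y', 7)]).getD (Char.ofNat k) 0 := by
  decide

theorem pvCharContrib' (c : Char) (h : pvDomChar c = true) :
    (if PySem.Chars.isIn [PySem.Chars.upperChar c] "AEIOUY".toList then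
      ((PySem.Dict.ofList [('A', (1:Int)), ('E', 5), ('I', 9), ('O', 6), ('U', 3), ('Y', 7)]).get?
        (PySem.Chars.upperChar c)).getD 0
     else 0)
    = (PySem.Dict.ofList [('A', (1:Int)), ('E', 5), ('I', 9), ('O', 6), ('U', 3), ('Y', 7),
                          ('a', 1), ('e', 5), ('i', 9), ('o', 6), ('u', 3), ('y', 7)]).getD c 0 := by
  have hk : c.toNat < 128 := by
    simp [pvDomChar] at h
    omega
  have := pvCharContrib c.toNat hk
  rwa [Char.ofNat_toNat] at this

-- filter-then-map sum = map-with-0 sum (the shape of A's guarded generator sum)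
theorem pvFilterMapSum (l : List Char) (p : Char → Bool) (f : Char → Int) :
    ((l.filter p).map f).sum = (l.map (fun c => if p c then f c else 0)).sum := by
  induction l with
  | nil => rfl
  | cons c l ih =>
    by_cases h : p c <;> simp [h, ih]

-- the two totals agree on the domain (list level)
theorem pvTotalEqList (l : List Char) (h : ∀ c ∈ l, pvDomChar c = true) :
    (l.map ((fun c => if PySem.Chars.isIn [c] "AEIOUY".toList then
        ((PySem.Dict.ofList [('A', (1:Int)), ('E', 5), ('I', 9), ('O', 6), ('U', 3), ('Y', 7)]).get? c).getD 0
      else 0) ∘ PySem.Chars.upperChar)).sum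
    = (l.map (fun ch =>
        (PySem.Dict.ofList [('A', (1:Int)), ('E', 5), ('I', 9), ('O', 6), ('U', 3), ('Y', 7),
                            ('a', 1), ('e', 5), ('i', 9), ('o', 6), ('u', 3), ('y', 7)]).getD ch 0)).sum := by
  induction l with
  | nil => rfl
  | cons c l ih =>
    simp only [List.map_cons, List.sum_cons, Function.comp_apply]
    rw [ih (fun x hx => h x (List.mem_cons_of_mem _ hx)), pvCharContrib' c (h c (List.mem_cons_self ..))]

-- the two totals agree on the domain
theorem pvTotalEq (full_name : String) (h : Dom_calculate_passion_number full_name) :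
    (((PySem.Str.upper full_name).toList.filter
        (fun ch => PySem.Chars.isIn [ch] "AEIOUY".toList)).map
      (fun ch => ((PySem.Dict.ofList [('A', (1:Int)), ('E', 5), ('I', 9), ('O', 6), ('U', 3), ('Y', 7)]).get? ch).getD 0)).sum
    = (full_name.toList.map (fun ch =>
        (PySem.Dict.ofList [('A', (1:Int)), ('E', 5), ('I', 9), ('O', 6), ('U', 3), ('Y', 7),
                            ('a', 1), ('e', 5), ('i', 9), ('o', 6), ('u', 3), ('y', 7)]).getD ch 0)).sum := by
  rw [pvFilterMapSum]
  rw [PySem.Str.toList_upper, PySem.Chars.upper, List.map_map]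
  unfold Dom_calculate_passion_number pvDomStr at h
  rw [List.all_eq_true] at h
  exact pvTotalEqList full_name.toList h

-- B's per-character value is nonnegative
theorem pvValNonneg (c : Char) :
    0 ≤ (PySem.Dict.ofList [('A', (1:Int)), ('E', 5), ('I', 9), ('O', 6), ('U', 3), ('Y', 7),
                            ('a', 1), ('e', 5), ('i', 9), ('o', 6), ('u', 3), ('y', 7)]).getD c 0 := by
  rw [PySem.Dict.getD_eq_get?_getD]
  rcases hg : (PySem.Dict.ofList [('A', (1:Int)), ('E', 5), ('I', 9), ('O', 6), ('U', 3), ('Y', 7),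
      ('a', 1), ('e', 5), ('i', 9), ('o', 6), ('u', 3), ('y', 7)]).get? c with _ | v
  · simp
  · have hm := PySem.Dict.mem_items_of_get?_eq_some _ hg
    simp only [show (PySem.Dict.ofList [('A', (1:Int)), ('E', 5), ('I', 9), ('O', 6), ('U', 3), ('Y', 7),
        ('a', 1), ('e', 5), ('i', 9), ('o', 6), ('u', 3), ('y', 7)]).items
      = [('A', (1:Int)), ('E', 5), ('I', 9), ('O', 6), ('U', 3), ('Y', 7),
         ('a', 1), ('e', 5), ('i', 9), ('o', 6), ('u', 3), ('y', 7)] from by decide,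
      List.mem_cons, Prod.mk.injEq] at hm
    rcases hm with ⟨_,rfl⟩|⟨_,rfl⟩|⟨_,rfl⟩|⟨_,rfl⟩|⟨_,rfl⟩|⟨_,rfl⟩|⟨_,rfl⟩|⟨_,rfl⟩|⟨_,rfl⟩|⟨_,rfl⟩|⟨_,rfl⟩|⟨_,rfl⟩|h
    · norm_num
    · norm_num
    · norm_num
    · norm_num
    · norm_num
    · norm_num
    · norm_num
    · norm_num
    · norm_num
    · norm_num
    · norm_num
    · norm_num
    · simp at h

-- digit sum of a positive number is positive
theorem pvDigitsSum_pos : ∀ m : Nat, 0 < m → 0 < (Nat.digits 10 m).sum := by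
  intro m
  induction m using Nat.strong_induction_on with
  | _ m ih =>
    intro hp
    rw [Nat.digits_def' (by norm_num : 1 < 10) hp]
    simp only [List.sum_cons]
    by_cases h : m % 10 = 0
    · have : 0 < m / 10 := by omega
      have := ih (m / 10) (by omega) this
      omega
    · omega

-- the whole while-loop computes the digital root
theorem pvReduceLoop_eq : ∀ m : Nat,
    pvReduceLoop (m : Int) = if m = 0 then 0 else ((1 + (m - 1) % 9 : Nat) : Int) := by
  intro m
  induction m using Nat.strong_induction_on with
  | _ m ih =>
    rw [pvReduceLoop]
    by_cases h9 : 9 < (m : Int)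
    · have hm10 : 10 ≤ m := by omega
      rw [if_pos h9, pvDigitSumA_cast]
      have hlt : (Nat.digits 10 m).sum < m := by
        rw [Nat.digits_def' (by norm_num : 1 < 10) (by omega : 0 < m)]
        have := pvDigitsSum_le (m / 10)
        simp only [List.sum_cons]; omega
      rw [ih _ hlt]
      have hpos := pvDigitsSum_pos m (by omega)
      have hmod : m % 9 = (Nat.digits 10 m).sum % 9 := Nat.modEq_nine_digits_sum m
      have h0 : ¬ ((Nat.digits 10 m).sum = 0) := by omega
      rw [if_neg h0, if_neg (by omega : ¬ m = 0)]
      congr 1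
      omega
    · rw [if_neg h9]
      by_cases h0 : m = 0
      · simp [h0]
      · rw [if_neg h0]
        congr 1
        omega

-- B's closed form equals the digital root for nonnegative totals
theorem pvClosedForm (m : Nat) (h0 : ¬ (m : Int) = 0) :
    1 + PySem.Int.mod ((m : Int) - 1) 9 = ((1 + (m - 1) % 9 : Nat) : Int) := by
  rw [PySem.Int.mod_eq_emod_of_pos (by norm_num : (0:Int) < 9)]
  omega

-- ===== VERDICT (by name: the statement is the Claim_ definition above) =====
theorem calculate_passion_number_spec : Claim_equal_calculate_passion_number := by
  intro full_name hdom
  unfold Spec_calculate_passion_number calculate_passion_number calculate_passion_number_alt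
  simp only []
  rw [pvTotalEq full_name hdom]
  set t := (full_name.toList.map (fun ch =>
      (PySem.Dict.ofList [('A', (1:Int)), ('E', 5), ('I', 9), ('O', 6), ('U', 3), ('Y', 7),
                          ('a', 1), ('e', 5), ('i', 9), ('o', 6), ('u', 3), ('y', 7)]).getD ch 0)).sum with ht
  have htn : 0 ≤ t := by
    rw [ht]
    apply List.sum_nonneg
    intro x hx
    simp only [List.mem_map] at hx
    obtain ⟨c, _, rfl⟩ := hx
    exact pvValNonneg c
  unfold pvReduceNum
  by_cases hmaster : t = 11 ∨ t = 22 ∨ t = 33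
  · rw [if_pos hmaster, if_pos hmaster]
  · rw [if_neg hmaster, if_neg hmaster]
    have hm : t = ((t.toNat : Nat) : Int) := by omega
    rw [hm, pvReduceLoop_eq]
    by_cases h0 : t.toNat = 0
    · simp [h0]
    · rw [if_neg h0, if_neg (by omega : ¬ ((t.toNat : Nat) : Int) = 0),
          pvClosedForm t.toNat (by omega)]
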